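-- pv_equiv track=rewrite | github.com/PrakarshBhardwaj/Document-maker-django | main/models.py | delete_from_sequence
-- ===== SOURCE A (Python) =====
-- def delete_from_sequence(seq, pos, char):
-- 	cnt = 0
-- 	assert pos > 0 and pos < len(seq), "Position provided is not valid"
-- 	for i,v in enumerate(seq[:-1]):
-- 		if v == char:
-- 			cnt += 1
-- 		if cnt == pos:
-- 			return seq[:i] + seq[i+1:]
-- 	return seq[:-1]
-- ===== SOURCE B (Python) =====
-- def delete_from_sequence(seq, pos, char):
-- 	assert pos > 0 and pos < len(seq), "Position provided is not valid"
-- 	indices = []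
-- 	for i in range(len(seq) - 1):
-- 		if seq[i] == char:
-- 			indices.append(i)
-- 	if len(indices) >= pos:
-- 		i = indices[pos - 1]
-- 		return seq[:i] + seq[i + 1:]
-- 	return seq[:-1]
-- ===== Notes on version B (the rewrite author's own statement) =====
-- stated objective: alternative
-- what changed: A's single early-returning scan that counts occurrences and bails at the pos-th match is replaced by a build-then-select decomposition: first collect the full list of match indices over seq[:-1], then index it at pos-1 (falling back to seq[:-1] when there are fewer than pos matches).
import Mathlib
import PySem

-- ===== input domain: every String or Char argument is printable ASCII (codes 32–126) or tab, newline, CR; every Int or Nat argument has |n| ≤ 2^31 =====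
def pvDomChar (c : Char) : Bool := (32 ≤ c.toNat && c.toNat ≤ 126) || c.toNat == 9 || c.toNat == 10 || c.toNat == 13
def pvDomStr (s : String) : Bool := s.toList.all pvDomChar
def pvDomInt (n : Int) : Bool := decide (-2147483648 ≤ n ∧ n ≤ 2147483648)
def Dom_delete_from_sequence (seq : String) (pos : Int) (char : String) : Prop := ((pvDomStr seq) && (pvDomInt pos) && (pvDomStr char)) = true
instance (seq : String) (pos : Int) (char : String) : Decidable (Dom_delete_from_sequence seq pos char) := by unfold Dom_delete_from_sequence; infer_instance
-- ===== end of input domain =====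

-- B replaces A's early-returning count-and-bail scan by building the full list of match
-- indices over seq[:-1] and then selecting index pos-1 from it (objective: alternative).

-- ===== PORT A =====
-- A's loop over enumerate(seq[:-1]): index i, running count cnt; early return is the
-- non-recursive branch. seq[:i] + seq[i+1:] with 0 ≤ i < len(seq) is take i ++ drop (i+1)
-- (exact: i is a nonnegative in-range enumerate index). Python's `v == char` compares the
-- one-character string of v with char, i.e. [v] = char.toList.
def pvLoopA (seqL : List Char) (char : String) (pos : Int) : List Char → Nat → Int → String
  | [], _, _ => String.mk seqL.dropLast
  | v :: rest, i, cnt =>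
    let cnt' := if [v] = char.toList then cnt + 1 else cnt
    if cnt' = pos then String.mk (seqL.take i ++ seqL.drop (i + 1))
    else pvLoopA seqL char pos rest (i + 1) cnt'

def delete_from_sequence (seq : String) (pos : Int) (char : String) : String :=
  pvLoopA seq.toList char pos seq.toList.dropLast 0 0

-- ===== PORT B =====
-- Source B's index-collecting loop `for i in range(len(seq)-1): if seq[i] == char: …` as a
-- filter over range(len(seq)-1); seq[i] never raises there, so getD is exact.
def pvMatchIndices (cs : List Char) (char : String) : List Nat :=
  (List.range (cs.length - 1)).filter (fun i => decide ([cs.getD i ' '] = char.toList))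

def delete_from_sequence_alt (seq : String) (pos : Int) (char : String) : String :=
  let cs := seq.toList
  let indices := pvMatchIndices cs char
  if pos ≤ (indices.length : Int) then
    let i := PySem.List.pyGetD indices (pos - 1) 0
    String.mk (cs.take i ++ cs.drop (i + 1))
  else String.mk cs.dropLast

-- ===== PRECONDITION & SPEC =====
-- Pre_ is exactly A's assert `pos > 0 and pos < len(seq)`; outside it A raises AssertionError.
def Pre_delete_from_sequence (seq : String) (pos : Int) (char : String) : Prop :=
  0 < pos ∧ pos < (seq.toList.length : Int)
instance (seq : String) (pos : Int) (char : String) : Decidable (Pre_delete_from_sequence seq pos char) := by unfold Pre_delete_from_sequence; infer_instance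

def pvWitness_delete_from_sequence : String × Int × String := ("abcab", 2, "a")

def Spec_delete_from_sequence (seq : String) (pos : Int) (char : String) (out : String) : Prop := out = delete_from_sequence_alt seq pos char
instance (seq : String) (pos : Int) (char : String) (out : String) : Decidable (Spec_delete_from_sequence seq pos char out) := by unfold Spec_delete_from_sequence; infer_instance

-- ===== CLAIM (what is proved, stated in full; the proofs are below) =====
def Claim_equal_delete_from_sequence : Prop := ∀ (seq : String) (pos : Int) (char : String), Dom_delete_from_sequence seq pos char → Pre_delete_from_sequence seq pos char → Spec_delete_from_sequence seq pos char (delete_from_sequence seq pos char)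

-- ===== LEMMAS AND PROOFS =====

-- index of the pos-th match, relative to the scanned list
def pvFindNth (char : String) : Int → List Char → Option Nat
  | _, [] => none
  | pos, v :: rest =>
    if [v] = char.toList then
      if pos = 1 then some 0 else (pvFindNth char (pos - 1) rest).map (· + 1)
    else (pvFindNth char pos rest).map (· + 1)

lemma pvLoopA_eq (seqL : List Char) (char : String) (pos : Int) :
    ∀ (rest : List Char) (i : Nat) (cnt : Int), cnt < pos →
    pvLoopA seqL char pos rest i cnt =
      (pvFindNth char (pos - cnt) rest).elim (String.mk seqL.dropLast)
        (fun j => String.mk (seqL.take (i + j) ++ seqL.drop (i + j + 1))) := by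
  intro rest
  induction rest with
  | nil => intro i cnt _; simp [pvLoopA, pvFindNth]
  | cons v rest ih =>
    intro i cnt hlt
    by_cases hm : [v] = char.toList
    · by_cases he : cnt + 1 = pos
      · have h1 : pos - cnt = 1 := by omega
        simp [pvLoopA, pvFindNth, hm, he, h1]
      · have hlt' : cnt + 1 < pos := by omega
        have hne1 : ¬ (pos - cnt = 1) := by omega
        have harg : pos - (cnt + 1) = pos - cnt - 1 := by omega
        rw [show pvLoopA seqL char pos (v :: rest) i cnt
              = pvLoopA seqL char pos rest (i + 1) (cnt + 1) by
              simp [pvLoopA, hm, he]]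
        rw [ih (i + 1) (cnt + 1) hlt', harg]
        simp only [pvFindNth, if_pos hm, if_neg hne1]
        cases pvFindNth char (pos - cnt - 1) rest with
        | none => simp
        | some j =>
          simp only [Option.map_some, Option.elim_some]
          have : i + 1 + j = i + (j + 1) := by omega
          rw [this]
    · have hne : ¬ (cnt = pos) := by omega
      rw [show pvLoopA seqL char pos (v :: rest) i cnt
            = pvLoopA seqL char pos rest (i + 1) cnt by
            simp [pvLoopA, hm, hne]]
      rw [ih (i + 1) cnt hlt]
      simp only [pvFindNth, if_neg hm]
      cases pvFindNth char (pos - cnt) rest with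
      | none => simp
      | some j =>
        simp only [Option.map_some, Option.elim_some]
        have : i + 1 + j = i + (j + 1) := by omega
        rw [this]

lemma pvFindNth_eq (char : String) :
    ∀ (bd : List Char) (pos : Int), 0 < pos →
    pvFindNth char pos bd =
      ((List.range bd.length).filter (fun i => decide ([bd.getD i ' '] = char.toList)))[(pos - 1).toNat]? := by
  intro bd
  induction bd with
  | nil => intro pos _; simp [pvFindNth]
  | cons v rest ih =>
    intro pos hpos
    have hrange : List.range (rest.length + 1) = 0 :: (List.range rest.length).map Nat.succ :=
      List.range_succ_eq_map
    have hfm : ((List.range rest.length).map Nat.succ).filter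
          (fun i => decide ([(v :: rest).getD i ' '] = char.toList))
        = ((List.range rest.length).filter
            (fun i => decide ([rest.getD i ' '] = char.toList))).map Nat.succ := by
      rw [List.filter_map]
      simp only [Function.comp_def, List.getD_cons_succ]
    by_cases hm : [v] = char.toList
    · by_cases h1 : pos = 1
      · subst h1
        simp [pvFindNth, hm, hrange, hfm]
      · have hpos' : 0 < pos - 1 := by omega
        have hnat : (pos - 1).toNat = ((pos - 1 - 1).toNat) + 1 := by omega
        simp only [pvFindNth, if_pos hm, if_neg h1]
        rw [ih (pos - 1) hpos']
        simp only [List.length_cons, hrange, List.filter_cons]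
        simp only [List.getD_cons_zero, hm, decide_true, if_pos trivial, hfm, hnat,
          List.getElem?_cons_succ, List.getElem?_map]
    · simp only [pvFindNth, if_neg hm]
      rw [ih pos hpos]
      simp only [List.length_cons, hrange, List.filter_cons]
      simp only [List.getD_cons_zero, hm, decide_false, hfm]
      have : (if false = true then
          0 :: ((List.range rest.length).filter (fun i => decide ([rest.getD i ' '] = char.toList))).map Nat.succ
        else ((List.range rest.length).filter (fun i => decide ([rest.getD i ' '] = char.toList))).map Nat.succ)
        = ((List.range rest.length).filter (fun i => decide ([rest.getD i ' '] = char.toList))).map Nat.succ := by simp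
      rw [this, List.getElem?_map]

-- B's filter over the full string, restricted to range(len-1), sees exactly seq[:-1]
lemma pvMatchIndices_eq (cs : List Char) (char : String) :
    pvMatchIndices cs char =
      (List.range cs.dropLast.length).filter
        (fun i => decide ([cs.dropLast.getD i ' '] = char.toList)) := by
  unfold pvMatchIndices
  rw [List.length_dropLast]
  apply List.filter_congr
  intro i hi
  have hilt : i < cs.length - 1 := List.mem_range.mp hi
  have h1 : cs.getD i ' ' = cs.dropLast.getD i ' ' := by
    have hlt : i < cs.dropLast.length := by simp [List.length_dropLast]; omega
    rw [List.getD_eq_getElem cs ' ' (by omega), List.getD_eq_getElem _ ' ' hlt,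
      List.getElem_dropLast]
  rw [h1]

-- ===== VERDICT (by name: the statement is the Claim_ definition above) =====
theorem delete_from_sequence_spec : Claim_equal_delete_from_sequence := by
  intro seq pos char _ hpre
  obtain ⟨hpos, hlen⟩ := hpre
  unfold Spec_delete_from_sequence delete_from_sequence
  rw [pvLoopA_eq seq.toList char pos seq.toList.dropLast 0 0 (by omega)]
  rw [show pos - 0 = pos from by omega, pvFindNth_eq char _ pos hpos, ← pvMatchIndices_eq]
  rw [show delete_from_sequence_alt seq pos char =
      (if pos ≤ ((pvMatchIndices seq.toList char).length : Int) then
        String.mk (seq.toList.take (PySem.List.pyGetD (pvMatchIndices seq.toList char) (pos - 1) 0) ++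
          seq.toList.drop (PySem.List.pyGetD (pvMatchIndices seq.toList char) (pos - 1) 0 + 1))
      else String.mk seq.toList.dropLast) from rfl]
  by_cases hle : pos ≤ ((pvMatchIndices seq.toList char).length : Int)
  · have hlt : (pos - 1).toNat < (pvMatchIndices seq.toList char).length := by omega
    rw [List.getElem?_eq_getElem hlt, if_pos hle,
      PySem.List.pyGetD_eq_getElem (pvMatchIndices seq.toList char) (i := pos - 1) 0
        (by omega) (by omega)]
    simp
  · have hge : (pvMatchIndices seq.toList char).length ≤ (pos - 1).toNat := by omega
    rw [List.getElem?_eq_none hge, if_neg hle]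
    simp
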